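-- pv_equiv track=rewrite | github.com/jeremychow99/codeIT-suisse-22 | quordle.py | grey_letters
-- ===== SOURCE A (Python) =====
-- def grey_letters(answers, attempts):
--     alphabet_dict = {
--         "A": 0,
--         "B": 1,
--         "C": 2,
--         "D": 3,
--         "E": 4,
--         "F": 5,
--         "G": 6,
--         "H": 7,
--         "I": 8,
--         "J": 9,
--         "K": 10,
--         "L": 11,
--         "M": 12,
--         "N": 13,
--         "O": 14,
--         "P": 15,
--         "Q": 16,
--         "R": 17,
--         "S": 18,
--         "T": 19,
--         "U": 20,
--         "V": 21,
--         "W": 22,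
--         "X": 23,
--         "Y": 24,
--         "Z": 25,
--     }
--
--     number_dict = {
--         0: "A",
--         1: "B",
--         2: "C",
--         3: "D",
--         4: "E",
--         5: "F",
--         6: "G",
--         7: "H",
--         8: "I",
--         9: "J",
--         10: "K",
--         11: "L",
--         12: "M",
--         13: "N",
--         14: "O",
--         15: "P",
--         16: "Q",
--         17: "R",
--         18: "S",
--         19: "T",
--         20: "U",
--         21: "V",
--         22: "W",
--         23: "X",
--         24: "Y",
--         25: "Z",
--     }
--
--     res_list = [""] * 26
--
--     n_attempts = len(attempts)
--
--     for attempt in attempts: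
--
--         # Check if attempt corresponds to answer
--         if attempt in answers:
--             answers.remove(attempt)
--
--         ans_str = "".join(answers)
--         for char in attempt:
--             if char not in ans_str:
--                 if res_list[alphabet_dict[char]] == "":
--                     res_list[alphabet_dict[char]] = str(n_attempts)
--
--         n_attempts -= 1
--
--     leftover = ""
--
--     for index, result in enumerate(res_list):
--         if result == "":
--             leftover += number_dict[index]
--
--     res = "".join(res_list)
--
--     return res, leftover
-- ===== SOURCE B (Python) =====
-- def grey_letters(answers, attempts):
--     # Frequency-counter reimplementation: O(total_answer_length + sum(len(attempt)))
--     # instead of re-joining all remaining answers for every attempt.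
--     # NOTE: unlike A, this does not mutate `answers`; equivalence is about the return value.
--     remaining = {}
--     for a in answers:
--         remaining[a] = remaining.get(a, 0) + 1
--     letters = {}
--     for a in answers:
--         for c in a:
--             letters[c] = letters.get(c, 0) + 1
--     first_grey = {}
--     label = len(attempts)
--     for attempt in attempts:
--         if remaining.get(attempt, 0) > 0:
--             remaining[attempt] = remaining.get(attempt, 0) - 1
--             for c in attempt:
--                 letters[c] = letters.get(c, 0) - 1
--         for c in attempt:
--             if letters.get(c, 0) == 0 and c not in first_grey:
--                 first_grey[c] = str(label)
--         label -= 1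
--     res = "".join(first_grey.get(chr(65 + i), "") for i in range(26))
--     leftover = "".join(chr(65 + i) for i in range(26) if chr(65 + i) not in first_grey)
--     return res, leftover
-- ===== Notes on version B (the rewrite author's own statement) =====
-- stated objective: faster
-- what changed: B replaces A's per-attempt removal scan and re-join of all remaining answers (plus substring search per letter) by answer- and letter-frequency dictionaries built once and updated in O(len(attempt)) per removal, with O(1) presence tests; the result grid is kept as a dict instead of a 26-slot list.
import Mathlib
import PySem

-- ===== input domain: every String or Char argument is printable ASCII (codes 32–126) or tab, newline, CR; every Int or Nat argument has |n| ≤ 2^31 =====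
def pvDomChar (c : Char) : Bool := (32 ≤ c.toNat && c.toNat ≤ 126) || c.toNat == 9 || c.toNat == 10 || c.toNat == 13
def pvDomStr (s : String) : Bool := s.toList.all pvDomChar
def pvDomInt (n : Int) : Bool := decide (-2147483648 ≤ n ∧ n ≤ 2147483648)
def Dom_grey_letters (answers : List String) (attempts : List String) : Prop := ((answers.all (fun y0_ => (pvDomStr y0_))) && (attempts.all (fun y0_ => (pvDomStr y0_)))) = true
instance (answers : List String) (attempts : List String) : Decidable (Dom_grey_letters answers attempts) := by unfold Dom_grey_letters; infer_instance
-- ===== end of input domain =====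

-- B replaces A's per-attempt re-join of all remaining answers by letter/answer frequency
-- counters updated on removal (objective: faster). A mutates `answers` in place (remove);
-- B does not: the equivalence proved here is about the return value only.

-- ===== PORT A =====
-- alphabet_dict / number_dict from A, as PySem dicts
def pvAlpha : PySem.Dict Char Int := PySem.Dict.ofList
  [('A',0),('B',1),('C',2),('D',3),('E',4),('F',5),('G',6),('H',7),('I',8),('J',9),
   ('K',10),('L',11),('M',12),('N',13),('O',14),('P',15),('Q',16),('R',17),('S',18),
   ('T',19),('U',20),('V',21),('W',22),('X',23),('Y',24),('Z',25)]
def pvNum : PySem.Dict Int String := PySem.Dict.ofList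
  [(0,"A"),(1,"B"),(2,"C"),(3,"D"),(4,"E"),(5,"F"),(6,"G"),(7,"H"),(8,"I"),(9,"J"),
   (10,"K"),(11,"L"),(12,"M"),(13,"N"),(14,"O"),(15,"P"),(16,"Q"),(17,"R"),(18,"S"),
   (19,"T"),(20,"U"),(21,"V"),(22,"W"),(23,"X"),(24,"Y"),(25,"Z")]

-- one iteration of A's `for attempt in attempts` loop; state = (answers, res_list, n_attempts)
def pvAStep (st : List String × List String × Int) (attempt : String) :
    List String × List String × Int :=
  let ans := st.1
  -- `if attempt in answers: answers.remove(attempt)` (remove? is some here since attempt ∈ ans)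
  let ans' := if attempt ∈ ans then (PySem.List.remove? ans attempt).getD ans else ans
  let ansStr := PySem.Str.join "" ans'
  let res' := attempt.toList.foldl (fun r c =>
    if PySem.Str.isIn (String.ofList [c]) ansStr = false then
      -- alphabet_dict[char]: KeyError outside Pre_ (getD 0 is never the lookup inside Pre_);
      -- the index is then in 0..25, so getD/set are Python's res_list[idx] exactly.
      let idx := ((pvAlpha.get? c).getD 0).toNat
      if r.getD idx "" = "" then r.set idx (PySem.Int.toStr st.2.2) else r
    else r) st.2.1
  (ans', res', st.2.2 - 1)

def grey_letters (answers : List String) (attempts : List String) : String × String :=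
  let st := attempts.foldl pvAStep (answers, List.replicate 26 "", (attempts.length : Int))
  let resList := st.2.1
  -- `for index, result in enumerate(res_list): if result == "": leftover += number_dict[index]`
  let leftover := (PySem.List.enumerate resList).foldl
    (fun acc p => if p.2 = "" then acc ++ (pvNum.get? p.1).getD "" else acc) ""
  (PySem.Str.join "" resList, leftover)

-- ===== PORT B =====
-- one iteration of B's loop; state = (remaining, letters, first_grey, label)
def pvBStep (st : PySem.Dict String Int × PySem.Dict Char Int × PySem.Dict Char String × Int)
    (attempt : String) :
    PySem.Dict String Int × PySem.Dict Char Int × PySem.Dict Char String × Int :=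
  let rem := st.1
  let rem' := if rem.getD attempt 0 > 0 then rem.insert attempt (rem.getD attempt 0 - 1) else rem
  let lets' := if rem.getD attempt 0 > 0 then
      attempt.toList.foldl (fun d c => d.insert c (d.getD c 0 - 1)) st.2.1
    else st.2.1
  let fg' := attempt.toList.foldl (fun d c =>
      if lets'.getD c 0 = 0 && !(d.contains c) then d.insert c (PySem.Int.toStr st.2.2.2)
      else d) st.2.2.1
  (rem', lets', fg', st.2.2.2 - 1)

def grey_letters_alt (answers : List String) (attempts : List String) : String × String :=
  let rem0 := answers.foldl (fun d a => d.insert a (d.getD a 0 + 1)) PySem.Dict.empty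
  let lets0 := answers.foldl
    (fun d a => a.toList.foldl (fun d c => d.insert c (d.getD c 0 + 1)) d) PySem.Dict.empty
  let st := attempts.foldl pvBStep (rem0, lets0, PySem.Dict.empty, (attempts.length : Int))
  let fg := st.2.2.1
  let res := PySem.Str.join "" ((List.range 26).map (fun i => fg.getD (Char.ofNat (65 + i)) ""))
  let leftover := PySem.Str.join ""
    (((List.range 26).filter (fun i => !(fg.contains (Char.ofNat (65 + i))))).map
      (fun i => String.ofList [Char.ofNat (65 + i)]))
  (res, leftover)

-- ===== PRECONDITION & SPEC =====
-- Pre_ excludes attempts containing characters outside 'A'..'Z': on those A raises KeyError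
-- (alphabet_dict[char]) whenever such a character is absent from the remaining answers at that
-- moment; where such a character happens to survive in the answers A still returns, and B returns
-- the same value there, but that stateful condition has no closed form, so all of them are excluded.
def Pre_grey_letters (answers : List String) (attempts : List String) : Prop :=
  (attempts.all (fun s => s.toList.all
    (fun c => decide ('A' ≤ c) && decide (c ≤ 'Z')))) = true
instance (answers : List String) (attempts : List String) : Decidable (Pre_grey_letters answers attempts) := by unfold Pre_grey_letters; infer_instance

def pvWitness_grey_letters : List String × List String := (["ABC", "DE"], ["AXE", "ABC"])

def Spec_grey_letters (answers : List String) (attempts : List String) (out : String × String) : Prop := out = grey_letters_alt answers attempts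
instance (answers : List String) (attempts : List String) (out : String × String) : Decidable (Spec_grey_letters answers attempts out) := by unfold Spec_grey_letters; infer_instance

-- ===== CLAIM (what is proved, stated in full; the proofs are below) =====
def Claim_equal_grey_letters : Prop := ∀ (answers : List String) (attempts : List String), Dom_grey_letters answers attempts → Pre_grey_letters answers attempts → Spec_grey_letters answers attempts (grey_letters answers attempts)

-- ===== LEMMAS AND PROOFS =====

-- the coupling invariant between A's state (ans, res) and B's state (rem, lets, fg)
def pvInv (ans : List String) (res : List String) (rem : PySem.Dict String Int)
    (lets : PySem.Dict Char Int) (fg : PySem.Dict Char String) : Prop :=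
  res.length = 26 ∧
  (∀ s : String, rem.getD s 0 = (ans.count s : Int)) ∧
  (∀ c : Char, lets.getD c 0 = ((ans.flatMap String.toList).count c : Int)) ∧
  (∀ i : Nat, i < 26 →
    res.getD i "" = fg.getD (Char.ofNat (65 + i)) "" ∧
    (res.getD i "" = "" ↔ fg.contains (Char.ofNat (65 + i)) = false))

theorem pvDigitsCore_len (b f n : Nat) (tl : List Char) : (Nat.toDigitsCore b f n tl).length ≥ tl.length := by
  induction f generalizing n tl with
  | zero => simp [Nat.toDigitsCore]
  | succ f ih =>
    simp only [Nat.toDigitsCore]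
    split
    · simp
    · exact le_trans (by simp) (ih _ _)
theorem pvToStr_ne_empty (n : Int) : PySem.Int.toStr n ≠ "" := by
  intro h
  have h2 : (PySem.Int.toStr n).toList = [] := by rw [h]; rfl
  rw [PySem.Int.toList_toStr] at h2
  unfold PySem.Int.toChars at h2
  split at h2
  · simp at h2
  · unfold Nat.toDigits at h2
    rw [Nat.toDigitsCore] at h2
    split at h2
    · simp at h2
    · have := pvDigitsCore_len 10 n.toNat (n.toNat / 10) [(n.toNat % 10).digitChar]
      rw [h2] at this; simp at this
theorem pvJoin_toList (l : List String) :
    (PySem.Str.join "" l).toList = l.flatMap String.toList := by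
  rw [PySem.Str.toList_join]
  show PySem.Chars.join [] _ = _
  unfold PySem.Chars.join
  induction l with
  | nil => simp [List.intercalate]
  | cons x xs ih =>
    cases xs with
    | nil => simp [List.intercalate]
    | cons y ys => simp_all [List.intercalate]

theorem pvAlpha_get_ofNat : ∀ i : Nat, i < 26 →
    (pvAlpha.get? (Char.ofNat (65 + i))).getD 0 = (i : Int) := by decide
theorem pvAlpha_get (c : Char) (h1 : 'A' ≤ c) (h2 : c ≤ 'Z') :
    (pvAlpha.get? c).getD 0 = ((c.toNat : Int) - 65) := by
  have hv1 : 65 ≤ c.toNat := h1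
  have hv2 : c.toNat ≤ 90 := h2
  have hc : c = Char.ofNat (65 + (c.toNat - 65)) := by
    rw [Nat.add_sub_cancel' hv1]
    exact (Char.ofNat_toNat c).symm
  conv_lhs => rw [hc]
  rw [pvAlpha_get_ofNat _ (by omega)]
  omega
theorem pvNum_get : ∀ i : Nat, i < 26 →
    (pvNum.get? (i : Int)).getD "" = String.ofList [Char.ofNat (65 + i)] := by decide

theorem pvIsIn_singleton (c : Char) (l : List String) :
    PySem.Str.isIn (String.ofList [c]) (PySem.Str.join "" l) = false ↔ c ∉ l.flatMap String.toList := by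
  rw [← Bool.not_eq_true, PySem.Str.isIn_iff_infix, pvJoin_toList]
  simp [List.singleton_infix_iff]
theorem pvDec_fold (cs : List Char) (d : PySem.Dict Char Int) (c : Char) :
    (cs.foldl (fun d c => d.insert c (d.getD c 0 - 1)) d).getD c 0 = d.getD c 0 - cs.count c := by
  induction cs generalizing d with
  | nil => simp
  | cons x xs ih =>
    simp only [List.foldl_cons, ih, PySem.Dict.getD_insert, List.count_cons]
    by_cases h : c = x
    · simp [h]; omega
    · simp [h]; exact fun hx => h hx.symm
theorem pvLets0_getD (answers : List String) (c : Char) :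
    (answers.foldl (fun d a => a.toList.foldl (fun d c => d.insert c (d.getD c 0 + 1)) d)
      PySem.Dict.empty).getD c 0 = ((answers.flatMap String.toList).count c : Int) := by
  have gen : ∀ (l : List String) (d : PySem.Dict Char Int),
      (l.foldl (fun d a => a.toList.foldl (fun d c => d.insert c (d.getD c 0 + 1)) d) d).getD c 0
      = d.getD c 0 + ((l.flatMap String.toList).count c : Int) := by
    intro l
    induction l with
    | nil => simp
    | cons x xs ih =>
      intro d
      simp only [List.foldl_cons, ih, PySem.Dict.getD_foldl_insert_add_one, List.flatMap_cons,
        List.count_append]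
      push_cast; ring
  simp [gen]

theorem pvChr_toNat (i : Nat) (h : i < 26) : (Char.ofNat (65 + i)).toNat = 65 + i := by
  rw [Char.toNat_ofNat, if_pos (by constructor; omega)]

theorem pvChr_eq_iff (c : Char) (h1 : 'A' ≤ c) (h2 : c ≤ 'Z') (i : Nat) (h : i < 26) :
    (Char.ofNat (65 + i) = c) ↔ i = c.toNat - 65 := by
  have hv1 : 65 ≤ c.toNat := h1
  have hv2 : c.toNat ≤ 90 := h2
  constructor
  · intro he; have := pvChr_toNat i h; rw [he] at this; omega
  · intro he
    have : 65 + i = c.toNat := by omega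
    rw [this]; exact Char.ofNat_toNat c

theorem pvChar_fold (cs : List Char) (hup : ∀ c ∈ cs, 'A' ≤ c ∧ c ≤ 'Z')
    (ansStr : List String) (lets : PySem.Dict Char Int)
    (hlets : ∀ c : Char, lets.getD c 0 = ((ansStr.flatMap String.toList).count c : Int))
    (res : List String) (fg : PySem.Dict Char String) (n : Int)
    (hlen : res.length = 26)
    (h4 : ∀ i : Nat, i < 26 →
      res.getD i "" = fg.getD (Char.ofNat (65 + i)) "" ∧
      (res.getD i "" = "" ↔ fg.contains (Char.ofNat (65 + i)) = false)) :
    (cs.foldl (fun r c =>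
      if PySem.Str.isIn (String.ofList [c]) (PySem.Str.join "" ansStr) = false then
        let idx := ((pvAlpha.get? c).getD 0).toNat
        if r.getD idx "" = "" then r.set idx (PySem.Int.toStr n) else r
      else r) res).length = 26 ∧
    (∀ i : Nat, i < 26 →
      (cs.foldl (fun r c =>
        if PySem.Str.isIn (String.ofList [c]) (PySem.Str.join "" ansStr) = false then
          let idx := ((pvAlpha.get? c).getD 0).toNat
          if r.getD idx "" = "" then r.set idx (PySem.Int.toStr n) else r
        else r) res).getD i ""
        = (cs.foldl (fun d c =>
            if lets.getD c 0 = 0 && !(d.contains c) then d.insert c (PySem.Int.toStr n) else d)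
            fg).getD (Char.ofNat (65 + i)) "" ∧
      ((cs.foldl (fun r c =>
        if PySem.Str.isIn (String.ofList [c]) (PySem.Str.join "" ansStr) = false then
          let idx := ((pvAlpha.get? c).getD 0).toNat
          if r.getD idx "" = "" then r.set idx (PySem.Int.toStr n) else r
        else r) res).getD i "" = ""
        ↔ (cs.foldl (fun d c =>
            if lets.getD c 0 = 0 && !(d.contains c) then d.insert c (PySem.Int.toStr n) else d)
            fg).contains (Char.ofNat (65 + i)) = false)) := by
  induction cs generalizing res fg with
  | nil => exact ⟨hlen, h4⟩
  | cons c cs ih =>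
    obtain ⟨hc1, hc2⟩ := hup c (by simp)
    have hv1 : 65 ≤ c.toNat := hc1
    have hv2 : c.toNat ≤ 90 := hc2
    have hupt : ∀ x ∈ cs, 'A' ≤ x ∧ x ≤ 'Z' := fun x hx => hup x (by simp [hx])
    simp only [List.foldl_cons]
    by_cases hmem : c ∈ ansStr.flatMap String.toList
    · -- char still present: both sides skip
      have hA : ¬ (PySem.Str.isIn (String.ofList [c]) (PySem.Str.join "" ansStr) = false) := by
        rw [pvIsIn_singleton]; simp [hmem]
      have hB : lets.getD c 0 ≠ 0 := by
        have := List.count_pos_iff.mpr hmem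
        rw [hlets]; exact_mod_cast this.ne'
      rw [if_neg hA, if_neg (by simp [hB])]
      exact ih hupt res fg hlen h4
    · -- char absent: A may set res, B may insert into fg
      have hA : PySem.Str.isIn (String.ofList [c]) (PySem.Str.join "" ansStr) = false := by
        rw [pvIsIn_singleton]; exact hmem
      have hB0 : lets.getD c 0 = 0 := by
        rw [hlets]; exact_mod_cast (List.count_eq_zero.mpr hmem)
      have hidx : ((pvAlpha.get? c).getD 0).toNat = c.toNat - 65 := by
        rw [pvAlpha_get c hc1 hc2]; omega
      have hidxlt : c.toNat - 65 < 26 := by omega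
      have hcchr : Char.ofNat (65 + (c.toNat - 65)) = c := by
        rw [show 65 + (c.toNat - 65) = c.toNat by omega]; exact Char.ofNat_toNat c
      rw [if_pos hA]
      simp only [hidx]
      obtain ⟨he1, he2⟩ := h4 (c.toNat - 65) hidxlt
      by_cases hempty : res.getD (c.toNat - 65) "" = ""
      · -- A sets, B inserts
        have hcont : fg.contains (Char.ofNat (65 + (c.toNat - 65))) = false := (h4 _ hidxlt).2.mp hempty
        rw [hcchr] at hcont
        rw [if_pos hempty, if_pos (by simp [hB0, hcont])]
        apply ih hupt
        · simp [hlen]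
        · intro i hi
          have hins := PySem.Dict.getD_insert (d := fg) (k := c) (v := PySem.Int.toStr n) (k' := Char.ofNat (65 + i)) (d0 := "")
          have hgd : (res.set (c.toNat - 65) (PySem.Int.toStr n)).getD i ""
              = if i = c.toNat - 65 then PySem.Int.toStr n else res.getD i "" := by
            by_cases hieq : i = c.toNat - 65
            · subst hieq
              rw [if_pos rfl, List.getD_eq_getElem?_getD, List.getElem?_set_self (by omega)]
              rfl
            · rw [if_neg hieq, List.getD_eq_getElem?_getD, List.getElem?_set_ne (by omega),
                ← List.getD_eq_getElem?_getD]
          have hkey : (Char.ofNat (65 + i) = c) ↔ i = c.toNat - 65 := pvChr_eq_iff c hc1 hc2 i hi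
          constructor
          · rw [hgd, hins]
            by_cases hieq : i = c.toNat - 65
            · rw [if_pos hieq, if_pos (hkey.mpr hieq)]
            · rw [if_neg hieq, if_neg (fun h => hieq (hkey.mp h)), (h4 i hi).1]
          · rw [hgd, PySem.Dict.contains_insert]
            by_cases hieq : i = c.toNat - 65
            · rw [if_pos hieq]
              simp [hkey.mpr hieq, pvToStr_ne_empty n]
            · rw [if_neg hieq]
              have : (Char.ofNat (65 + i) == c) = false := by
                rw [beq_eq_false_iff_ne]; exact fun h => hieq (hkey.mp h)
              rw [this]
              simpa using (h4 i hi).2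
      · -- slot already set: A skips, and fg already contains c, so B skips
        have hcont : fg.contains c = true := by
          have := (h4 _ hidxlt).2
          rw [hcchr] at this
          cases hcf : fg.contains c
          · exact absurd (this.mpr hcf) hempty
          · rfl
        rw [if_neg hempty, if_neg (by simp [hcont])]
        exact ih hupt res fg hlen h4

theorem pvStep_inv (attempt : String) (hup : ∀ c ∈ attempt.toList, 'A' ≤ c ∧ c ≤ 'Z')
    (ans res rem lets fg) (n : Int) (h : pvInv ans res rem lets fg) :
    pvInv (pvAStep (ans, res, n) attempt).1 (pvAStep (ans, res, n) attempt).2.1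
      (pvBStep (rem, lets, fg, n) attempt).1 (pvBStep (rem, lets, fg, n) attempt).2.1
      (pvBStep (rem, lets, fg, n) attempt).2.2.1 := by
  obtain ⟨hlen, hrem, hlets, h4⟩ := h
  by_cases hm : attempt ∈ ans
  · have hpos : rem.getD attempt 0 > 0 := by
      rw [hrem]; exact_mod_cast List.count_pos_iff.mpr hm
    have hperm : ans.Perm (attempt :: ans.erase attempt) := List.perm_cons_erase hm
    have herase : (PySem.List.remove? ans attempt).getD ans = ans.erase attempt := by
      rw [PySem.List.remove?_eq_some_erase ans attempt hm]; rfl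
    have hansA : (pvAStep (ans, res, n) attempt).1 = ans.erase attempt := by
      simp only [pvAStep, if_pos hm, herase]
    have hcount : ∀ s : String, ans.count s
        = (if s = attempt then 1 else 0) + (ans.erase attempt).count s := by
      intro s
      rw [hperm.count s, List.count_cons]
      by_cases hs : s = attempt
      · have hcp : 0 < ans.count attempt := List.count_pos_iff.mpr hm
        simp [hs]; omega
      · simp [hs]; exact fun h => hs h.symm
    have hflat : ∀ c : Char, (ans.flatMap String.toList).count c
        = attempt.toList.count c + ((ans.erase attempt).flatMap String.toList).count c := by
      intro c
      rw [(hperm.flatMap_right String.toList).count c, List.flatMap_cons, List.count_append]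
    have hlets' : ∀ c : Char,
        (attempt.toList.foldl (fun d c => d.insert c (d.getD c 0 - 1)) lets).getD c 0
        = (((ans.erase attempt).flatMap String.toList).count c : Int) := by
      intro c
      rw [pvDec_fold, hlets, hflat c]
      push_cast; ring
    have key := pvChar_fold attempt.toList hup (ans.erase attempt) _ hlets' res fg n hlen h4
    refine ⟨?_, ?_, ?_, ?_⟩ <;>
      simp only [pvAStep, pvBStep, if_pos hm, if_pos hpos, herase]
    · exact key.1
    · intro s
      rw [PySem.Dict.getD_insert]
      by_cases hs : s = attempt
      · subst hs
        rw [if_pos rfl, hrem, hcount s, if_pos rfl]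
        push_cast; ring
      · rw [if_neg hs, hrem, hcount s, if_neg hs]
        push_cast; ring
    · exact hlets'
    · exact key.2
  · have hpos : ¬ (rem.getD attempt 0 > 0) := by
      rw [hrem]
      have : ans.count attempt = 0 := List.count_eq_zero.mpr hm
      omega
    have key := pvChar_fold attempt.toList hup ans lets hlets res fg n hlen h4
    refine ⟨?_, ?_, ?_, ?_⟩ <;>
      simp only [pvAStep, pvBStep, if_neg hm, if_neg hpos]
    · exact key.1
    · exact hrem
    · exact hlets
    · exact key.2
theorem pvFold_inv (attempts : List String)
    (hup : ∀ s ∈ attempts, ∀ c ∈ s.toList, 'A' ≤ c ∧ c ≤ 'Z')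
    (ans res rem lets fg) (n : Int) (h : pvInv ans res rem lets fg) :
    pvInv (attempts.foldl pvAStep (ans, res, n)).1
      (attempts.foldl pvAStep (ans, res, n)).2.1
      (attempts.foldl pvBStep (rem, lets, fg, n)).1
      (attempts.foldl pvBStep (rem, lets, fg, n)).2.1
      (attempts.foldl pvBStep (rem, lets, fg, n)).2.2.1 := by
  induction attempts generalizing ans res rem lets fg n with
  | nil => exact h
  | cons a as ih =>
    simp only [List.foldl_cons]
    have hstep := pvStep_inv a (hup a (by simp)) ans res rem lets fg n h
    have := ih (fun s hs => hup s (by simp [hs]))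
      (pvAStep (ans, res, n) a).1 (pvAStep (ans, res, n) a).2.1
      (pvBStep (rem, lets, fg, n) a).1 (pvBStep (rem, lets, fg, n) a).2.1
      (pvBStep (rem, lets, fg, n) a).2.2.1 (n - 1) hstep
    exact this

theorem pvEnum_map {α : Type} (k : Nat) (f : Nat → α) :
    PySem.List.enumerate ((List.range k).map f) = (List.range k).map (fun (i : Nat) => (((i : Nat) : Int), f i)) := by
  induction k with
  | zero => simp
  | succ k ih =>
    rw [List.range_succ, List.map_append, List.map_append, PySem.List.enumerate_append, ih]
    simp [PySem.List.enumerate]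
theorem pvLeftover_fold (g : Int → String) (l : List (Int × String)) (acc : String) :
    (l.foldl (fun acc p => if p.2 = "" then acc ++ g p.1 else acc) acc).toList
    = acc.toList ++ (l.filter (fun p => p.2 = "")).flatMap (fun p => (g p.1).toList) := by
  induction l generalizing acc with
  | nil => simp
  | cons p ps ih =>
    simp only [List.foldl_cons, List.filter_cons]
    by_cases hp : p.2 = ""
    · simp [hp, ih, String.toList_append]
    · simp [hp, ih]
theorem pvRender (res : List String) (fg : PySem.Dict Char String)
    (hlen : res.length = 26)
    (h4 : ∀ i : Nat, i < 26 →
      res.getD i "" = fg.getD (Char.ofNat (65 + i)) "" ∧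
      (res.getD i "" = "" ↔ fg.contains (Char.ofNat (65 + i)) = false)) :
    (PySem.Str.join "" res,
      (PySem.List.enumerate res).foldl
        (fun acc p => if p.2 = "" then acc ++ (pvNum.get? p.1).getD "" else acc) "")
    = (PySem.Str.join "" ((List.range 26).map (fun i => fg.getD (Char.ofNat (65 + i)) "")),
       PySem.Str.join ""
        (((List.range 26).filter (fun i => !(fg.contains (Char.ofNat (65 + i))))).map
          (fun i => String.ofList [Char.ofNat (65 + i)]))) := by
  have hres : res = (List.range 26).map (fun i => fg.getD (Char.ofNat (65 + i)) "") := by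
    apply List.ext_getElem (by simp [hlen])
    intro i hi _
    have h26 : i < 26 := by omega
    have := (h4 i h26).1
    rw [List.getD_eq_getElem?_getD, List.getElem?_eq_getElem hi] at this
    simp only [List.getElem_map, List.getElem_range]
    exact this
  refine Prod.ext ?_ ?_
  · simpa using congrArg (PySem.Str.join "") hres
  · show _ = _
    apply String.toList_inj.mp
    conv_lhs => rw [hres]
    rw [pvEnum_map]
    dsimp only
    rw [pvLeftover_fold (fun x => (pvNum.get? x).getD ""), pvJoin_toList]
    rw [List.filter_map, List.flatMap_map, List.flatMap_map]
    simp only [Function.comp_def]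
    have hfil : ∀ i ∈ List.range 26,
        (decide (fg.getD (Char.ofNat (65 + i)) "" = "")) = (!(fg.contains (Char.ofNat (65 + i)))) := by
      intro i hi
      have h26 : i < 26 := List.mem_range.mp hi
      have h2 := (h4 i h26).2
      rw [(h4 i h26).1] at h2
      cases hc : fg.contains (Char.ofNat (65 + i)) <;> simp [hc] at h2 <;> simp [h2]
    rw [List.filter_congr hfil]
    apply List.flatMap_congr
    intro i hi
    have h26 : i < 26 := List.mem_range.mp (List.mem_of_mem_filter hi)
    rw [pvNum_get i h26, String.toList_ofList]

-- ===== VERDICT (by name: the statement is the Claim_ definition above) =====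
theorem grey_letters_spec : Claim_equal_grey_letters := by
  intro answers attempts _ hpre
  have hup : ∀ s ∈ attempts, ∀ c ∈ s.toList, 'A' ≤ c ∧ c ≤ 'Z' := by
    simp only [Pre_grey_letters, List.all_eq_true, Bool.and_eq_true, decide_eq_true_eq] at hpre
    exact hpre
  unfold Spec_grey_letters grey_letters grey_letters_alt
  simp only []
  have h0 : pvInv answers (List.replicate 26 "")
      (answers.foldl (fun d a => d.insert a (d.getD a 0 + 1)) PySem.Dict.empty)
      (answers.foldl
        (fun d a => a.toList.foldl (fun d c => d.insert c (d.getD c 0 + 1)) d) PySem.Dict.empty)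
      PySem.Dict.empty := by
    refine ⟨by simp, ?_, pvLets0_getD answers, ?_⟩
    · intro s
      rw [PySem.Dict.getD_foldl_insert_add_one]
      simp
    · intro i hi
      rw [List.getD_replicate _ hi]
      simp
  have hInv := pvFold_inv attempts hup answers (List.replicate 26 "") _ _ PySem.Dict.empty
    (attempts.length : Int) h0
  exact pvRender _ _ hInv.1 hInv.2.2.2
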